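-- pv_equiv track=rewrite | github.com/dayasagarsalianr/GFG | Difficulty: Medium/Number of paths in a matrix with k coins/number-of-paths-in-a-matrix-with-k-coins.py | numberOfPath
-- ===== SOURCE A (Python) =====
-- def numberOfPath(mat, k):
--     n, m = len(mat), len(mat[0])
--     dp = [[0] * (k + 1) for _ in range(m)]
--     if mat[0][0] <= k:
--         dp[0][mat[0][0]] = 1
--     for j in range(1, m):
--         for s in range(mat[0][j], k + 1):
--             dp[j][s] = dp[j - 1][s - mat[0][j]]
--     for i in range(1, n):
--         ndp = [[0] * (k + 1) for _ in range(m)]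
--         if mat[i][0] <= k:
--             for s in range(mat[i][0], k + 1):
--                 ndp[0][s] = dp[0][s - mat[i][0]]
--         for j in range(1, m):
--             for s in range(mat[i][j], k + 1):
--                 ndp[j][s] = ndp[j - 1][s - mat[i][j]] + dp[j][s - mat[i][j]]
--         dp = ndp
--     return dp[m - 1][k]
-- ===== SOURCE B (Python) =====
-- def numberOfPath(mat, k):
--     n, m = len(mat), len(mat[0])
--     memo = [[[None] * (k + 1) for _ in range(m)] for _ in range(n)]
--
--     def g(i, j, s):
--         # number of monotone (right/down) paths from (0,0) to (i,j) with coin sum exactly s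
--         if memo[i][j][s] is None:
--             r = s - mat[i][j]
--             if r < 0:
--                 res = 0
--             elif i == 0 and j == 0:
--                 res = 1 if r == 0 else 0
--             else:
--                 res = (g(i - 1, j, r) if i > 0 else 0) + (g(i, j - 1, r) if j > 0 else 0)
--             memo[i][j][s] = res
--         return memo[i][j][s]
--
--     return g(n - 1, m - 1, k)
-- ===== Notes on version B (the rewrite author's own statement) =====
-- stated objective: alternative
-- what changed: Replaces A's iterative row-by-row sweep with a rolling pair of m x (k+1) tables by a top-down memoized recursion g(i,j,s) counting paths from (0,0) to (i,j) with coin-sum exactly s, so only reachable (cell,sum) states are ever computed.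
-- outside the precondition, e.g. on numberOfPath([[-1]], 0): A returns 1, B returns 0
import Mathlib
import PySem

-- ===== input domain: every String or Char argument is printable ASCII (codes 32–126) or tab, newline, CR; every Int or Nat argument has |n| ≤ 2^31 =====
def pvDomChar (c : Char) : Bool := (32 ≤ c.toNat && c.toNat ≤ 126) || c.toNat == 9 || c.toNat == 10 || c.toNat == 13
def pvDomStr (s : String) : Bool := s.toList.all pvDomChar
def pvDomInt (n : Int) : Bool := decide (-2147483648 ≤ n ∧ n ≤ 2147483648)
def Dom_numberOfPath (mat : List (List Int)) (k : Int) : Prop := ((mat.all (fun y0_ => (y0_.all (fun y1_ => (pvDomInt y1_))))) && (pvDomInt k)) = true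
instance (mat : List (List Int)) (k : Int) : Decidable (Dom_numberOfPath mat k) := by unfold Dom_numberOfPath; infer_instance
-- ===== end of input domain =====

-- B replaces A's bottom-up rolling-row sweep by a top-down memoized recursion over (cell, sum);
-- the memo cache only speeds B up and is elided in the port (same values). Equal return values on Pre_.

-- ===== PORT A =====
-- the inner 'for s in range(c, k+1): col[s] = <value read at s-c>' loop, writing into a fresh [0]*(k+1)
def pvFill (v : Int → Int) (c k : Int) : List Int :=
  (PySem.List.pyRange c (k + 1) 1).foldl
    (fun col s => col.set s.toNat (v (s - c))) (List.replicate (k.toNat + 1) 0)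

def numberOfPath (mat : List (List Int)) (k : Int) : Int :=
  let n := mat.length
  let m := (mat.headD []).length
  let row0 := mat.headD []
  let zeros : List Int := List.replicate (k.toNat + 1) 0
  let dpInit : List (List Int) := List.replicate m zeros
  let dpInit := if row0.headD 0 ≤ k then dpInit.set 0 (zeros.set (row0.headD 0).toNat 1) else dpInit
  -- for j in range(1, m)
  let dp0 := (List.range' 1 (m - 1)).foldl (fun dp j =>
      dp.set j (pvFill (fun d => (dp.getD (j - 1) []).getD d.toNat 0) (row0.getD j 0) k)) dpInit
  -- for i in range(1, n)
  let dpN := (List.range' 1 (n - 1)).foldl (fun dp i =>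
      let row := mat.getD i []
      let ndpInit : List (List Int) := List.replicate m zeros
      let ndpInit := if row.headD 0 ≤ k then
          ndpInit.set 0 (pvFill (fun d => (dp.getD 0 []).getD d.toNat 0) (row.headD 0) k)
        else ndpInit
      (List.range' 1 (m - 1)).foldl (fun ndp j =>
          ndp.set j (pvFill (fun d =>
              (ndp.getD (j - 1) []).getD d.toNat 0 + (dp.getD j []).getD d.toNat 0)
            (row.getD j 0) k)) ndpInit) dp0
  (dpN.getD (m - 1) []).getD k.toNat 0

-- ===== PORT B =====
-- Source B's g(i, j, s): paths from (0,0) to (i,j) with coin sum exactly s (memo cache elided: same values)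
def pvG (mat : List (List Int)) (i j : Nat) (s : Int) : Int :=
  let r := s - ((mat.getD i []).getD j 0)
  if r < 0 then 0
  else if i = 0 ∧ j = 0 then (if r = 0 then 1 else 0)
  else (if _hi : i = 0 then 0 else pvG mat (i - 1) j r) +
       (if _hj : j = 0 then 0 else pvG mat i (j - 1) r)
termination_by i + j
decreasing_by all_goals omega

def numberOfPath_alt (mat : List (List Int)) (k : Int) : Int :=
  pvG mat (mat.length - 1) ((mat.headD []).length - 1) k

-- ===== PRECONDITION & SPEC =====
-- Pre_ restricts to the problem's natural domain: a nonempty rectangular matrix of NONNEGATIVE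
-- coin values and k ≥ 0. Outside it A raises (empty/ragged matrix, k < 0) or, for negative
-- entries, returns artifacts of Python's negative-index wraparound that are no one's intent.
def Pre_numberOfPath (mat : List (List Int)) (k : Int) : Prop :=
  mat ≠ [] ∧ (mat.headD []) ≠ [] ∧ 0 ≤ k ∧
  ∀ row ∈ mat, (mat.headD []).length ≤ row.length ∧
    ∀ x ∈ row.take (mat.headD []).length, 0 ≤ x
instance (mat : List (List Int)) (k : Int) : Decidable (Pre_numberOfPath mat k) := by
  unfold Pre_numberOfPath; infer_instance

def pvWitness_numberOfPath : List (List Int) × Int := ([[1, 2], [3, 0]], 3)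

def Spec_numberOfPath (mat : List (List Int)) (k : Int) (out : Int) : Prop := out = numberOfPath_alt mat k
instance (mat : List (List Int)) (k : Int) (out : Int) : Decidable (Spec_numberOfPath mat k out) := by unfold Spec_numberOfPath; infer_instance

-- ===== CLAIM (what is proved, stated in full; the proofs are below) =====
def Claim_equal_numberOfPath : Prop := ∀ (mat : List (List Int)) (k : Int), Dom_numberOfPath mat k → Pre_numberOfPath mat k → Spec_numberOfPath mat k (numberOfPath mat k)

-- ===== LEMMAS AND PROOFS =====

-- proof-side copies of A's loop bodies (definitionally equal to the port's inline lambdas)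
def pvStepCol0 (row0 : List Int) (k : Int) (dp : List (List Int)) (j : Nat) : List (List Int) :=
  dp.set j (pvFill (fun d => (dp.getD (j - 1) []).getD d.toNat 0) (row0.getD j 0) k)

def pvInit0 (mat : List (List Int)) (k : Int) : List (List Int) :=
  if (mat.headD []).headD 0 ≤ k then
    (List.replicate (mat.headD []).length (List.replicate (k.toNat + 1) (0:Int))).set 0
      ((List.replicate (k.toNat + 1) (0:Int)).set ((mat.headD []).headD 0).toNat 1)
  else List.replicate (mat.headD []).length (List.replicate (k.toNat + 1) 0)

def pvRow0 (mat : List (List Int)) (k : Int) : List (List Int) :=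
  (List.range' 1 ((mat.headD []).length - 1)).foldl (pvStepCol0 (mat.headD []) k) (pvInit0 mat k)

def pvStepCol (row : List Int) (k : Int) (dp ndp : List (List Int)) (j : Nat) : List (List Int) :=
  ndp.set j (pvFill (fun d =>
      (ndp.getD (j - 1) []).getD d.toNat 0 + (dp.getD j []).getD d.toNat 0) (row.getD j 0) k)

def pvStepRow (mat : List (List Int)) (k : Int) (dp : List (List Int)) (i : Nat) : List (List Int) :=
  (List.range' 1 ((mat.headD []).length - 1)).foldl (pvStepCol (mat.getD i []) k dp)
    (if (mat.getD i []).headD 0 ≤ k then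
      (List.replicate (mat.headD []).length (List.replicate (k.toNat + 1) (0:Int))).set 0
        (pvFill (fun d => (dp.getD 0 []).getD d.toNat 0) ((mat.getD i []).headD 0) k)
    else List.replicate (mat.headD []).length (List.replicate (k.toNat + 1) 0))

def pvTableN (mat : List (List Int)) (k : Int) : List (List Int) :=
  (List.range' 1 (mat.length - 1)).foldl (pvStepRow mat k) (pvRow0 mat k)

theorem numberOfPath_eq (mat : List (List Int)) (k : Int) :
    numberOfPath mat k = ((pvTableN mat k).getD ((mat.headD []).length - 1) []).getD k.toNat 0 := rfl

theorem getD_set' {α : Type} (l : List α) (i j : Nat) (v d : α) :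
    (l.set i v).getD j d = if i = j ∧ i < l.length then v else l.getD j d := by
  simp only [List.getD_eq_getElem?_getD, List.getElem?_set]
  by_cases h : i = j ∧ i < l.length
  · obtain ⟨rfl, hl⟩ := h
    simp [hl]
  · rw [if_neg h]
    by_cases hij : i = j
    · subst hij
      have : ¬ i < l.length := fun hl => h ⟨rfl, hl⟩
      simp [this]
    · simp [hij]

theorem getD_replicate' {α : Type} (n t : Nat) (x d : α) :
    (List.replicate n x).getD t d = if t < n then x else d := by
  simp only [List.getD_eq_getElem?_getD, List.getElem?_replicate]
  split_ifs <;> simp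

theorem getD_zeros (n t : Nat) : (List.replicate n (0:Int)).getD t 0 = 0 := by
  simp only [List.getD_eq_getElem?_getD, List.getElem?_replicate]
  split_ifs <;> simp

theorem fill_loop (v : Int → Int) (c k : Int) (hc : 0 ≤ c) :
    ∀ (N : Nat) (a : Int), c ≤ a → (k + 1 - a).toNat ≤ N →
    ∀ (col : List Int), col.length = k.toNat + 1 →
    ∀ t : Nat, t < k.toNat + 1 →
    ((PySem.List.pyRange a (k + 1) 1).foldl (fun col s => col.set s.toNat (v (s - c))) col).getD t 0
      = if a ≤ (t : Int) ∧ (t : Int) ≤ k then v ((t : Int) - c) else col.getD t 0 := by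
  intro N
  induction N with
  | zero =>
    intro a ha hN col hcol t ht
    have hab : k + 1 ≤ a := by omega
    rw [PySem.List.pyRange_one_eq_nil hab]
    have : ¬ (a ≤ (t : Int) ∧ (t : Int) ≤ k) := by omega
    simp [this]
  | succ n ih =>
    intro a ha hN col hcol t ht
    by_cases hab : a < k + 1
    · rw [PySem.List.pyRange_one_cons hab, List.foldl_cons]
      have ha0 : 0 ≤ a := le_trans hc ha
      have hcol' : (col.set a.toNat (v (a - c))).length = k.toNat + 1 := by
        simp [hcol]
      rw [ih (a + 1) (by omega) (by omega) _ hcol' t ht]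
      rw [getD_set' col a.toNat t (v (a - c)) 0]
      have hcast : (a.toNat : Int) = a := Int.toNat_of_nonneg ha0
      by_cases heq : a.toNat = t
      · have hat : a = (t : Int) := by omega
        have h1 : ¬ (a + 1 ≤ (t : Int) ∧ (t : Int) ≤ k) := by omega
        have h2 : a ≤ (t : Int) ∧ (t : Int) ≤ k := by constructor <;> omega
        have h3 : a.toNat = t ∧ a.toNat < col.length := by
          constructor
          · exact heq
          · omega
        rw [if_neg h1, if_pos h3, if_pos h2, hat]
      · have h3 : ¬ (a.toNat = t ∧ a.toNat < col.length) := fun h => heq h.1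
        rw [if_neg h3]
        have hne : a ≠ (t : Int) := by omega
        by_cases h4 : a + 1 ≤ (t : Int) ∧ (t : Int) ≤ k
        · rw [if_pos h4, if_pos ⟨by omega, h4.2⟩]
        · have h5 : ¬ (a ≤ (t : Int) ∧ (t : Int) ≤ k) := by omega
          rw [if_neg h4, if_neg h5]
    · rw [PySem.List.pyRange_one_eq_nil (by omega)]
      have : ¬ (a ≤ (t : Int) ∧ (t : Int) ≤ k) := by omega
      simp [this]

theorem foldl_set_length (v : Int → Int) (c : Int) :
    ∀ (xs : List Int) (col : List Int),
      (xs.foldl (fun col s => col.set s.toNat (v (s - c))) col).length = col.length := by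
  intro xs
  induction xs with
  | nil => intro col; rfl
  | cons x xs ih => intro col; rw [List.foldl_cons, ih]; simp

theorem fill_len (v : Int → Int) (c k : Int) : (pvFill v c k).length = k.toNat + 1 := by
  unfold pvFill
  rw [foldl_set_length]
  simp

theorem fill_getD (v : Int → Int) (c k : Int) (hc : 0 ≤ c) (hk : 0 ≤ k)
    (t : Nat) (ht : t < k.toNat + 1) :
    (pvFill v c k).getD t 0 = if c ≤ (t : Int) then v ((t : Int) - c) else 0 := by
  unfold pvFill
  rw [fill_loop v c k hc (k + 1 - c).toNat c le_rfl le_rfl _ (by simp) t ht]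
  have htk : (t : Int) ≤ k := by omega
  by_cases h : c ≤ (t : Int)
  · rw [if_pos ⟨h, htk⟩, if_pos h]
  · rw [if_neg (fun hh => h hh.1), if_neg h, getD_zeros]

def colOK (mat : List (List Int)) (k : Int) (i j : Nat) (col : List Int) : Prop :=
  col.length = k.toNat + 1 ∧ ∀ t : Nat, t < k.toNat + 1 → col.getD t 0 = pvG mat i j (t : Int)

def dpOK (mat : List (List Int)) (k : Int) (i : Nat) (dp : List (List Int)) : Prop :=
  dp.length = (mat.headD []).length ∧
  ∀ j : Nat, j < (mat.headD []).length → colOK mat k i j (dp.getD j [])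

theorem colOK_fill (mat : List (List Int)) (k : Int) (hk : 0 ≤ k) (i j : Nat)
    (c : Int) (hc : 0 ≤ c) (hcell : (mat.getD i []).getD j 0 = c)
    (hnz : ¬ (i = 0 ∧ j = 0)) (v : Int → Int)
    (hv : ∀ u : Nat, u < k.toNat + 1 →
        v (u : Int) = (if i = 0 then 0 else pvG mat (i - 1) j (u : Int)) +
                      (if j = 0 then 0 else pvG mat i (j - 1) (u : Int))) :
    colOK mat k i j (pvFill v c k) := by
  constructor
  · exact fill_len v c k
  · intro t ht
    rw [fill_getD v c k hc hk t ht]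
    conv_rhs => rw [pvG]
    rw [hcell]
    by_cases hct : c ≤ (t : Int)
    · rw [if_pos hct]
      have h0 : ¬ ((t : Int) - c < 0) := by omega
      rw [if_neg h0, if_neg hnz]
      have hu : (((t : Int) - c).toNat : Int) = (t : Int) - c := by omega
      have hul : ((t : Int) - c).toNat < k.toNat + 1 := by omega
      have := hv ((t : Int) - c).toNat hul
      rw [hu] at this
      rw [this]
      simp only [dite_eq_ite]
    · rw [if_neg hct]
      have h0 : (t : Int) - c < 0 := by omega
      rw [if_pos h0]

theorem colOK_zeros (mat : List (List Int)) (k : Int) (hk : 0 ≤ k) (i j : Nat)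
    (hgt : k < (mat.getD i []).getD j 0) :
    colOK mat k i j (List.replicate (k.toNat + 1) 0) := by
  constructor
  · simp
  · intro t ht
    rw [getD_zeros]
    conv_rhs => rw [pvG]
    have h0 : (t : Int) - (mat.getD i []).getD j 0 < 0 := by omega
    rw [if_pos h0]

theorem colOK_00 (mat : List (List Int)) (k : Int) (hk : 0 ≤ k)
    (c : Int) (hc : 0 ≤ c) (hcell : (mat.getD 0 []).getD 0 0 = c) :
    colOK mat k 0 0 (if c ≤ k then (List.replicate (k.toNat + 1) (0:Int)).set c.toNat 1
                     else List.replicate (k.toNat + 1) 0) := by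
  constructor
  · split_ifs <;> simp
  · intro t ht
    conv_rhs => rw [pvG]
    rw [hcell]
    simp only [and_self, if_true]
    by_cases hck : c ≤ k
    · rw [if_pos hck, getD_set' _ _ _ _ 0, getD_zeros]
      have hlen : (List.replicate (k.toNat + 1) (0:Int)).length = k.toNat + 1 := by simp
      by_cases heq : c.toNat = t
      · have h2 : c.toNat = t ∧ c.toNat < (List.replicate (k.toNat + 1) (0:Int)).length := by
          constructor
          · exact heq
          · omega
        have h3 : ¬ ((t : Int) - c < 0) := by omega
        have h4 : (t : Int) - c = 0 := by omega
        rw [if_pos h2, if_neg h3, if_pos h4]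
      · have h2 : ¬ (c.toNat = t ∧ c.toNat < (List.replicate (k.toNat + 1) (0:Int)).length) :=
          fun h => heq h.1
        rw [if_neg h2]
        by_cases h3 : (t : Int) - c < 0
        · rw [if_pos h3]
        · have h4 : ¬ ((t : Int) - c = 0) := by omega
          rw [if_neg h3, if_neg h4]
    · rw [if_neg hck, getD_zeros]
      have h3 : (t : Int) - c < 0 := by omega
      rw [if_pos h3]

theorem foldl_range'_inv {α : Type} (f : α → Nat → α) (P : Nat → α → Prop) :
    ∀ (len a : Nat) (init : α), P a init →
    (∀ j x, a ≤ j → j < a + len → P j x → P (j + 1) (f x j)) →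
    P (a + len) ((List.range' a len).foldl f init) := by
  intro len
  induction len with
  | zero => intro a init h _; simpa using h
  | succ n ih =>
    intro a init h hstep
    have hrw : a + (n + 1) = (a + 1) + n := by omega
    rw [hrw, List.range'_succ, List.foldl_cons]
    exact ih (a + 1) (f init a) (hstep a init le_rfl (by omega) h)
      (fun j x hj1 hj2 hx => hstep j x (by omega) (by omega) hx)

theorem headD_getD {α : Type} (l : List α) (d : α) : l.headD d = l.getD 0 d := by
  cases l <;> rfl

theorem entry_nonneg (mat : List (List Int))
    (hrect : ∀ row ∈ mat, (mat.headD []).length ≤ row.length ∧ ∀ x ∈ row.take (mat.headD []).length, 0 ≤ x)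
    (i j : Nat) (hi : i < mat.length) (hj : j < (mat.headD []).length) :
    0 ≤ (mat.getD i []).getD j 0 := by
  have hrow : mat.getD i [] ∈ mat := by
    rw [List.getD_eq_getElem mat [] hi]
    exact List.getElem_mem hi
  obtain ⟨hlen, hpos⟩ := hrect _ hrow
  have hj' : j < (mat.getD i []).length := lt_of_lt_of_le hj hlen
  rw [List.getD_eq_getElem (mat.getD i []) 0 hj']
  apply hpos
  have hjt : j < ((mat.getD i []).take (mat.headD []).length).length := by
    rw [List.length_take]; omega
  have : ((mat.getD i []).take (mat.headD []).length)[j] = (mat.getD i [])[j] :=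
    List.getElem_take
  rw [← this]
  exact List.getElem_mem hjt

theorem row0_ok (mat : List (List Int)) (k : Int) (hk : 0 ≤ k)
    (hne : mat ≠ []) (hne0 : mat.headD [] ≠ [])
    (hrect : ∀ row ∈ mat, (mat.headD []).length ≤ row.length ∧ ∀ x ∈ row.take (mat.headD []).length, 0 ≤ x) :
    dpOK mat k 0 (pvRow0 mat k) := by
  have hm : 0 < (mat.headD []).length := List.length_pos_of_ne_nil hne0
  have hn : 0 < mat.length := List.length_pos_of_ne_nil hne
  have hrow0 : mat.headD [] = mat.getD 0 [] := headD_getD mat []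
  have hcell0 : (mat.getD 0 []).getD 0 0 = (mat.headD []).headD 0 := by
    rw [headD_getD (mat.headD []) (0:Int), hrow0]
  have hc0 : 0 ≤ (mat.headD []).headD 0 := by
    rw [← hcell0]; exact entry_nonneg mat hrect 0 0 hn hm
  have hinit : (fun j tbl => tbl.length = (mat.headD []).length ∧
      ∀ j' : Nat, j' < j → colOK mat k 0 j' (tbl.getD j' [])) 1 (pvInit0 mat k) := by
    constructor
    · unfold pvInit0; split_ifs <;> simp
    · intro j' hj'
      have hj0 : j' = 0 := by omega
      subst hj0
      have hock := colOK_00 mat k hk _ hc0 hcell0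
      unfold pvInit0
      by_cases hck : (mat.headD []).headD 0 ≤ k
      · rw [if_pos hck] at hock ⊢
        rw [getD_set' _ _ _ _ []]
        rw [if_pos ⟨rfl, by simpa using hm⟩]
        exact hock
      · rw [if_neg hck] at hock ⊢
        rw [getD_replicate', if_pos hm]
        exact hock
  have hstep : ∀ j tbl, 1 ≤ j → j < 1 + ((mat.headD []).length - 1) →
      (fun j tbl => tbl.length = (mat.headD []).length ∧
        ∀ j' : Nat, j' < j → colOK mat k 0 j' (tbl.getD j' [])) j tbl →
      (fun j tbl => tbl.length = (mat.headD []).length ∧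
        ∀ j' : Nat, j' < j → colOK mat k 0 j' (tbl.getD j' [])) (j + 1)
        (pvStepCol0 (mat.headD []) k tbl j) := by
    intro j tbl hj1 hj2 ⟨htlen, hcols⟩
    have hjm : j < (mat.headD []).length := by omega
    have hcell : (mat.getD 0 []).getD j 0 = (mat.headD []).getD j 0 := by rw [← hrow0]
    have hc : 0 ≤ (mat.headD []).getD j 0 := by
      rw [← hcell]; exact entry_nonneg mat hrect 0 j hn hjm
    constructor
    · unfold pvStepCol0; simpa using htlen
    · intro j' hj'
      unfold pvStepCol0
      rw [getD_set' _ _ _ _ []]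
      by_cases heq : j = j'
      · subst heq
        rw [if_pos ⟨rfl, by omega⟩]
        apply colOK_fill mat k hk 0 j _ hc hcell (by omega)
        intro u hu
        have huc : ((u : Int)).toNat = u := by omega
        rw [huc, if_pos rfl, if_neg (by omega : ¬ j = 0), zero_add]
        exact (hcols (j - 1) (by omega)).2 u hu
      · rw [if_neg (fun h => heq h.1)]
        exact hcols j' (by omega)
  have h := foldl_range'_inv (pvStepCol0 (mat.headD []) k) _
      ((mat.headD []).length - 1) 1 (pvInit0 mat k) hinit hstep
  have hms : 1 + ((mat.headD []).length - 1) = (mat.headD []).length := by omega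
  rw [hms] at h
  exact ⟨h.1, fun j hj => h.2 j hj⟩

theorem rowstep_ok (mat : List (List Int)) (k : Int) (hk : 0 ≤ k)
    (_hne : mat ≠ []) (hne0 : mat.headD [] ≠ [])
    (hrect : ∀ row ∈ mat, (mat.headD []).length ≤ row.length ∧ ∀ x ∈ row.take (mat.headD []).length, 0 ≤ x)
    (dp : List (List Int)) (i : Nat) (hi1 : 1 ≤ i) (hin : i < mat.length)
    (hdp : dpOK mat k (i - 1) dp) :
    dpOK mat k i (pvStepRow mat k dp i) := by
  have hm : 0 < (mat.headD []).length := List.length_pos_of_ne_nil hne0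
  have hi0 : ¬ i = 0 := by omega
  have hcell0 : (mat.getD i []).getD 0 0 = (mat.getD i []).headD 0 :=
    (headD_getD (mat.getD i []) (0:Int)).symm
  have hinit : (fun j tbl => tbl.length = (mat.headD []).length ∧
      ∀ j' : Nat, j' < j → colOK mat k i j' (tbl.getD j' []))
      1 (if (mat.getD i []).headD 0 ≤ k then
          (List.replicate (mat.headD []).length (List.replicate (k.toNat + 1) (0:Int))).set 0
            (pvFill (fun d => (dp.getD 0 []).getD d.toNat 0) ((mat.getD i []).headD 0) k)
        else List.replicate (mat.headD []).length (List.replicate (k.toNat + 1) 0)) := by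
    constructor
    · split_ifs <;> simp
    · intro j' hj'
      have hj0 : j' = 0 := by omega
      subst hj0
      by_cases hck : (mat.getD i []).headD 0 ≤ k
      · rw [if_pos hck, getD_set' _ _ _ _ [], if_pos ⟨rfl, by simpa using hm⟩]
        apply colOK_fill mat k hk i 0 _ (by rw [← hcell0]; exact entry_nonneg mat hrect i 0 hin hm)
          hcell0 (fun h => hi0 h.1)
        intro u hu
        have huc : ((u : Int)).toNat = u := by omega
        rw [huc, if_neg hi0, if_pos rfl, add_zero]
        exact (hdp.2 0 hm).2 u hu
      · rw [if_neg hck, getD_replicate', if_pos hm]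
        exact colOK_zeros mat k hk i 0 (by rw [hcell0]; omega)
  have hstep : ∀ j tbl, 1 ≤ j → j < 1 + ((mat.headD []).length - 1) →
      (fun j tbl => tbl.length = (mat.headD []).length ∧
        ∀ j' : Nat, j' < j → colOK mat k i j' (tbl.getD j' [])) j tbl →
      (fun j tbl => tbl.length = (mat.headD []).length ∧
        ∀ j' : Nat, j' < j → colOK mat k i j' (tbl.getD j' []))
        (j + 1) (pvStepCol (mat.getD i []) k dp tbl j) := by
    intro j tbl hj1 hj2 ⟨htlen, hcols⟩
    have hjm : j < (mat.headD []).length := by omega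
    have hc : 0 ≤ (mat.getD i []).getD j 0 := entry_nonneg mat hrect i j hin hjm
    constructor
    · unfold pvStepCol; simpa using htlen
    · intro j' hj'
      unfold pvStepCol
      rw [getD_set' _ _ _ _ []]
      by_cases heq : j = j'
      · subst heq
        rw [if_pos ⟨rfl, by omega⟩]
        apply colOK_fill mat k hk i j _ hc rfl (fun h => hi0 h.1)
        intro u hu
        have huc : ((u : Int)).toNat = u := by omega
        rw [huc, if_neg hi0, if_neg (by omega : ¬ j = 0)]
        rw [(hcols (j - 1) (by omega)).2 u hu, (hdp.2 j hjm).2 u hu]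
        exact add_comm _ _
      · rw [if_neg (fun h => heq h.1)]
        exact hcols j' (by omega)
  have h := foldl_range'_inv (pvStepCol (mat.getD i []) k dp) _
      ((mat.headD []).length - 1) 1 _ hinit hstep
  have hms : 1 + ((mat.headD []).length - 1) = (mat.headD []).length := by omega
  rw [hms] at h
  exact ⟨h.1, fun j hj => h.2 j hj⟩

theorem tableN_ok (mat : List (List Int)) (k : Int) (hk : 0 ≤ k)
    (hne : mat ≠ []) (hne0 : mat.headD [] ≠ [])
    (hrect : ∀ row ∈ mat, (mat.headD []).length ≤ row.length ∧ ∀ x ∈ row.take (mat.headD []).length, 0 ≤ x) :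
    dpOK mat k (mat.length - 1) (pvTableN mat k) := by
  have hn : 0 < mat.length := List.length_pos_of_ne_nil hne
  have h := foldl_range'_inv (pvStepRow mat k) (fun i dp => dpOK mat k (i - 1) dp)
      (mat.length - 1) 1 (pvRow0 mat k)
      (by simpa using row0_ok mat k hk hne hne0 hrect)
      (fun i dp hi1 hi2 hdp => by
        simpa using rowstep_ok mat k hk hne hne0 hrect dp i hi1 (by omega) hdp)
  have hns : 1 + (mat.length - 1) = mat.length := by omega
  rw [hns] at h
  exact h

theorem final_eq (mat : List (List Int)) (k : Int) (hk : 0 ≤ k)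
    (hne : mat ≠ []) (hne0 : mat.headD [] ≠ [])
    (hrect : ∀ row ∈ mat, (mat.headD []).length ≤ row.length ∧ ∀ x ∈ row.take (mat.headD []).length, 0 ≤ x) :
    numberOfPath mat k = numberOfPath_alt mat k := by
  have hm : 0 < (mat.headD []).length := List.length_pos_of_ne_nil hne0
  rw [numberOfPath_eq]
  obtain ⟨hlen, hcols⟩ := tableN_ok mat k hk hne hne0 hrect
  rw [(hcols ((mat.headD []).length - 1) (by omega)).2 k.toNat (by omega)]
  unfold numberOfPath_alt
  rw [Int.toNat_of_nonneg hk]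

-- ===== VERDICT (by name: the statement is the Claim_ definition above) =====
theorem numberOfPath_spec : Claim_equal_numberOfPath := by
  intro mat k _dom hpre
  obtain ⟨hne, hne0, hk, hrect⟩ := hpre
  unfold Spec_numberOfPath
  exact final_eq mat k hk hne hne0 hrect
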